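-- pv_equiv track=rewrite | github.com/Hien-Trinh/leetcode | 649.dota-2-senate.py | predictPartyVictory
-- ===== SOURCE A (Python) =====
-- from collections import deque
--
-- def predictPartyVictory(senate: str) -> str:
--     rad, dire = deque(), deque()
--     tail = len(senate)
--
--     for i, party in enumerate(senate):
--         if party == 'R':
--             rad.append(i)
--         else:
--             dire.append(i)
--
--     while rad and dire:
--         r = rad.popleft()
--         d = dire.popleft()
--
--         if r < d:
--             rad.append(tail)
--         else:
--             dire.append(tail)
--
--         tail += 1
--
--     return "Radiant" if rad else "Dire"
-- ===== SOURCE B (Python) =====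
-- def predictPartyVictory(senate: str) -> str:
--     # One queue of normalized party characters: the front senator always acts,
--     # banning the first senator of the opposing party, then rejoins at the back.
--     q = ['R' if c == 'R' else 'D' for c in senate]
--     while 'R' in q and 'D' in q:
--         c = q.pop(0)
--         q.remove('D' if c == 'R' else 'R')
--         q.append(c)
--     return "Radiant" if 'R' in q else "Dire"
-- ===== Notes on version B (the rewrite author's own statement) =====
-- stated objective: simpler
-- what changed: Replaced A's two index deques with a growing tail counter and index comparisons by a single queue of party characters in which the front senator removes the first opposing senator and rejoins at the back, so no indices are tracked at all.
import Mathlib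
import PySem

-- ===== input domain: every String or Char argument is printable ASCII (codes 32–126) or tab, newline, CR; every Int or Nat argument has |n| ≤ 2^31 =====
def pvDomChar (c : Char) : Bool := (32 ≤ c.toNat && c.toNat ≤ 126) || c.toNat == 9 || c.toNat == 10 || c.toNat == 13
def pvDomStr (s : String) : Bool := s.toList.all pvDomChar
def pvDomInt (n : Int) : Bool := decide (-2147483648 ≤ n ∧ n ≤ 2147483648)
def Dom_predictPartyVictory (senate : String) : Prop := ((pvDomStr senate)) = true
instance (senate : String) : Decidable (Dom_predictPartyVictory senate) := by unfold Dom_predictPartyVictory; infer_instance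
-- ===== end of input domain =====

-- B replaces A's two index deques and growing tail counter by one queue of party
-- characters where the front senator bans the first opposing senator and rejoins
-- at the back (objective: simpler; not faster).

-- ===== PORT A =====
-- while rad and dire: pop both fronts, earlier index survives and is re-appended as `tail`
def loopA (rad dire : List Int) (tail : Int) : String :=
  match rad, dire with
  | r :: rs, d :: ds =>
      if r < d then loopA (rs ++ [tail]) ds (tail + 1)
      else loopA rs (ds ++ [tail]) (tail + 1)
  | [], _ => "Dire"            -- return "Radiant" if rad else "Dire"
  | _ :: _, [] => "Radiant"
termination_by rad.length + dire.length
decreasing_by all_goals simp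

def predictPartyVictory (senate : String) : String :=
  let tail := PySem.Str.len senate
  let p := (PySem.List.enumerate senate.toList).foldl
      (fun (p : List Int × List Int) ic =>
        if ic.2 = 'R' then (p.1 ++ [ic.1], p.2) else (p.1, p.2 ++ [ic.1]))
      ([], [])
  loopA p.1 p.2 tail

-- ===== PORT B =====
-- q.remove(v) is ported as List.erase: exact here because the loop guard
-- guarantees the removed party is present (Python never raises in B).
def loopB (q : List Char) : String :=
  if h : 'R' ∈ q ∧ 'D' ∈ q then
    match q, h with
    | c :: rest, _hcr => loopB ((rest.erase (if c = 'R' then 'D' else 'R')) ++ [c])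
  else if 'R' ∈ q then "Radiant" else "Dire"
termination_by q.length
decreasing_by
  have hm : (if c = 'R' then 'D' else 'R') ∈ rest := by
    by_cases hc : c = 'R'
    · simp only [if_pos hc]
      rcases List.mem_cons.mp _hcr.2 with he | hr
      · exact absurd (he.trans hc) (by decide)
      · exact hr
    · simp only [if_neg hc]
      rcases List.mem_cons.mp _hcr.1 with he | hr
      · exact absurd he.symm hc
      · exact hr
  simp [List.length_erase_of_mem hm]
  have := List.length_pos_of_mem hm
  omega

def predictPartyVictory_alt (senate : String) : String :=
  loopB (senate.toList.map (fun c => if c = 'R' then 'R' else 'D'))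

-- ===== PRECONDITION & SPEC =====
def Spec_predictPartyVictory (senate : String) (out : String) : Prop := out = predictPartyVictory_alt senate
instance (senate : String) (out : String) : Decidable (Spec_predictPartyVictory senate out) := by unfold Spec_predictPartyVictory; infer_instance

-- ===== CLAIM (what is proved, stated in full; the proofs are below) =====
def Claim_equal_predictPartyVictory : Prop := ∀ (senate : String), Dom_predictPartyVictory senate → Spec_predictPartyVictory senate (predictPartyVictory senate)

-- ===== LEMMAS AND PROOFS =====

-- merge of the two index queues back into the character-queue abstraction
def mg : List Int → List Int → List Char
  | [], ds => ds.map (fun _ => 'D')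
  | rs, [] => rs.map (fun _ => 'R')
  | r :: rs, d :: ds => if r < d then 'R' :: mg rs (d :: ds) else 'D' :: mg (r :: rs) ds
termination_by rs ds => rs.length + ds.length
decreasing_by all_goals simp

-- index lists A's initialisation loop builds, starting at index s
def ridx : List Char → Int → List Int
  | [], _ => []
  | c :: cs, s => if c = 'R' then s :: ridx cs (s + 1) else ridx cs (s + 1)

def didx : List Char → Int → List Int
  | [], _ => []
  | c :: cs, s => if c = 'R' then didx cs (s + 1) else s :: didx cs (s + 1)

lemma lb_ridx : ∀ (cs : List Char) (s x : Int), x ∈ ridx cs s → s ≤ x := by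
  intro cs
  induction cs with
  | nil => intro s x h; simp [ridx] at h
  | cons c cs ih =>
    intro s x h
    by_cases hc : c = 'R' <;> simp [ridx, hc] at h
    · rcases h with h | h
      · omega
      · have := ih (s + 1) x h; omega
    · have := ih (s + 1) x h; omega

lemma lb_didx : ∀ (cs : List Char) (s x : Int), x ∈ didx cs s → s ≤ x := by
  intro cs
  induction cs with
  | nil => intro s x h; simp [didx] at h
  | cons c cs ih =>
    intro s x h
    by_cases hc : c = 'R' <;> simp [didx, hc] at h
    · have := ih (s + 1) x h; omega
    · rcases h with h | h
      · omega
      · have := ih (s + 1) x h; omega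

lemma ub_ridx : ∀ (cs : List Char) (s x : Int), x ∈ ridx cs s → x < s + cs.length := by
  intro cs
  induction cs with
  | nil => intro s x h; simp [ridx] at h
  | cons c cs ih =>
    intro s x h
    by_cases hc : c = 'R' <;> simp [ridx, hc] at h <;> simp
    · rcases h with h | h
      · omega
      · have := ih (s + 1) x h; omega
    · have := ih (s + 1) x h; omega

lemma ub_didx : ∀ (cs : List Char) (s x : Int), x ∈ didx cs s → x < s + cs.length := by
  intro cs
  induction cs with
  | nil => intro s x h; simp [didx] at h
  | cons c cs ih =>
    intro s x h
    by_cases hc : c = 'R' <;> simp [didx, hc] at h <;> simp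
    · have := ih (s + 1) x h; omega
    · rcases h with h | h
      · omega
      · have := ih (s + 1) x h; omega

lemma pairwise_ridx : ∀ (cs : List Char) (s : Int), (ridx cs s).Pairwise (· < ·) := by
  intro cs
  induction cs with
  | nil => intro s; simp [ridx]
  | cons c cs ih =>
    intro s
    by_cases hc : c = 'R' <;> simp [ridx, hc]
    · exact ⟨fun x hx => by have := lb_ridx cs (s + 1) x hx; omega, ih (s + 1)⟩
    · exact ih (s + 1)

lemma pairwise_didx : ∀ (cs : List Char) (s : Int), (didx cs s).Pairwise (· < ·) := by
  intro cs
  induction cs with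
  | nil => intro s; simp [didx]
  | cons c cs ih =>
    intro s
    by_cases hc : c = 'R' <;> simp [didx, hc]
    · exact ih (s + 1)
    · exact ⟨fun x hx => by have := lb_didx cs (s + 1) x hx; omega, ih (s + 1)⟩

-- A's initialisation foldl builds exactly (ridx, didx)
lemma fold_init : ∀ (cs : List Char) (s : Int) (ar ad : List Int),
    (PySem.List.enumerate cs s).foldl
      (fun (p : List Int × List Int) ic =>
        if ic.2 = 'R' then (p.1 ++ [ic.1], p.2) else (p.1, p.2 ++ [ic.1]))
      (ar, ad) = (ar ++ ridx cs s, ad ++ didx cs s) := by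
  intro cs
  induction cs with
  | nil => intro s ar ad; simp [PySem.List.enumerate_nil, ridx, didx]
  | cons c cs ih =>
    intro s ar ad
    rw [PySem.List.enumerate_cons]
    by_cases hc : c = 'R' <;> simp [hc, List.foldl_cons, ih, ridx, didx]

lemma mg_nil_left (ds : List Int) : mg [] ds = ds.map (fun _ => 'D') := by
  cases ds <;> simp [mg]

lemma mg_nil_right (rs : List Int) : mg rs [] = rs.map (fun _ => 'R') := by
  cases rs <;> simp [mg]

lemma mg_cons_cons (r : Int) (rs : List Int) (d : Int) (ds : List Int) :
    mg (r :: rs) (d :: ds) = if r < d then 'R' :: mg rs (d :: ds) else 'D' :: mg (r :: rs) ds := by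
  simp [mg]

lemma D_mem_mg : ∀ (rs : List Int) (d : Int) (ds : List Int), 'D' ∈ mg rs (d :: ds) := by
  intro rs
  induction rs with
  | nil => intro d ds; simp [mg_nil_left]
  | cons r rs ih =>
    intro d ds
    rw [mg_cons_cons]
    split
    · simp [ih]
    · simp

lemma R_mem_mg : ∀ (ds : List Int) (r : Int) (rs : List Int), 'R' ∈ mg (r :: rs) ds := by
  intro ds
  induction ds with
  | nil => intro r rs; simp [mg_nil_right]
  | cons d ds ih =>
    intro r rs
    rw [mg_cons_cons]
    split
    · simp
    · simp [ih]

-- erasing the first 'D' of mg rs (d :: ds) drops exactly d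
lemma erase_D_mg : ∀ (rs : List Int) (d : Int) (ds : List Int), (∀ x ∈ ds, d < x) →
    (mg rs (d :: ds)).erase 'D' = mg rs ds := by
  intro rs
  induction rs with
  | nil =>
    intro d ds _
    simp [mg_nil_left]
  | cons r rs ih =>
    intro d ds hd
    rw [mg_cons_cons]
    by_cases hrd : r < d
    · rw [if_pos hrd, List.erase_cons_tail (by decide), ih d ds hd]
      cases ds with
      | nil => simp [mg_nil_right]
      | cons d' ds' =>
        rw [mg_cons_cons, if_pos (by have := hd d' (by simp); omega)]
    · rw [if_neg hrd, List.erase_cons_head]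

-- erasing the first 'R' of mg (r :: rs) ds drops exactly r
lemma erase_R_mg : ∀ (ds : List Int) (r : Int) (rs : List Int), (∀ x ∈ rs, r < x) →
    (mg (r :: rs) ds).erase 'R' = mg rs ds := by
  intro ds
  induction ds with
  | nil =>
    intro r rs _
    simp [mg_nil_right]
  | cons d ds ih =>
    intro r rs hr
    rw [mg_cons_cons]
    by_cases hrd : r < d
    · rw [if_pos hrd, List.erase_cons_head]
    · rw [if_neg hrd, List.erase_cons_tail (by decide), ih r rs hr]
      cases rs with
      | nil => simp [mg_nil_left]
      | cons r' rs' =>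
        rw [mg_cons_cons, if_neg (by have := hr r' (by simp); omega)]

-- appending a larger index on the R side appends 'R' to the merge
lemma mg_append_R : ∀ (n : Nat) (rs ds : List Int) (t : Int), rs.length + ds.length ≤ n →
    (∀ x ∈ rs, x < t) → (∀ x ∈ ds, x < t) → mg (rs ++ [t]) ds = mg rs ds ++ ['R'] := by
  intro n
  induction n with
  | zero =>
    intro rs ds t hn _ _
    have : rs = [] ∧ ds = [] := by
      constructor <;> (apply List.eq_nil_of_length_eq_zero; omega)
    rcases this with ⟨h1, h2⟩
    subst h1; subst h2
    simp [mg_nil_right]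
  | succ n ih =>
    intro rs ds t hn hr hd
    cases rs with
    | nil =>
      cases ds with
      | nil => simp [mg_nil_right]
      | cons d ds' =>
        have hih := ih [] ds' t (by simp at hn ⊢; omega) (by simp)
          (fun x hx => hd x (by simp [hx]))
        simp only [List.nil_append] at hih ⊢
        rw [mg_cons_cons, if_neg (by have := hd d (by simp); omega), hih,
          mg_nil_left, mg_nil_left]
        simp
    | cons r rs' =>
      cases ds with
      | nil =>
        simp [mg_nil_right]
      | cons d ds' =>
        rw [List.cons_append, mg_cons_cons, mg_cons_cons]
        by_cases hrd : r < d
        · rw [if_pos hrd, if_pos hrd,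
            ih rs' (d :: ds') t (by simp at hn ⊢; omega) (fun x hx => hr x (by simp [hx])) hd]
          simp
        · rw [if_neg hrd, if_neg hrd, ← List.cons_append,
            ih (r :: rs') ds' t (by simp at hn ⊢; omega) hr (fun x hx => hd x (by simp [hx]))]
          simp

-- appending a larger index on the D side appends 'D' to the merge
lemma mg_append_D : ∀ (n : Nat) (rs ds : List Int) (t : Int), rs.length + ds.length ≤ n →
    (∀ x ∈ rs, x < t) → (∀ x ∈ ds, x < t) → mg rs (ds ++ [t]) = mg rs ds ++ ['D'] := by
  intro n
  induction n with
  | zero =>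
    intro rs ds t hn _ _
    have : rs = [] ∧ ds = [] := by
      constructor <;> (apply List.eq_nil_of_length_eq_zero; omega)
    rcases this with ⟨h1, h2⟩
    subst h1; subst h2
    simp [mg_nil_left]
  | succ n ih =>
    intro rs ds t hn hr hd
    cases ds with
    | nil =>
      cases rs with
      | nil => simp [mg_nil_left]
      | cons r rs' =>
        have hih := ih rs' [] t (by simp at hn ⊢; omega)
          (fun x hx => hr x (by simp [hx])) (by simp)
        simp only [List.nil_append] at hih ⊢
        rw [mg_cons_cons, if_pos (by have := hr r (by simp); omega), hih,
          mg_nil_right, mg_nil_right]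
        simp
    | cons d ds' =>
      cases rs with
      | nil =>
        simp [mg_nil_left]
      | cons r rs' =>
        rw [List.cons_append, mg_cons_cons, mg_cons_cons]
        by_cases hrd : r < d
        · rw [if_pos hrd, if_pos hrd, ← List.cons_append,
            ih rs' (d :: ds') t (by simp at hn ⊢; omega) (fun x hx => hr x (by simp [hx])) hd]
          simp
        · rw [if_neg hrd, if_neg hrd,
            ih (r :: rs') ds' t (by simp at hn ⊢; omega) hr (fun x hx => hd x (by simp [hx]))]
          simp

-- unfolding lemmas for loopB
lemma loopB_step (c : Char) (rest : List Char) (h1 : 'R' ∈ c :: rest) (h2 : 'D' ∈ c :: rest) :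
    loopB (c :: rest) = loopB ((rest.erase (if c = 'R' then 'D' else 'R')) ++ [c]) := by
  rw [loopB]
  rw [dif_pos ⟨h1, h2⟩]

lemma loopB_noR (q : List Char) (h : 'R' ∉ q) : loopB q = "Dire" := by
  rw [loopB]
  rw [dif_neg (by simp [h]), if_neg h]

lemma loopB_noD (q : List Char) (h1 : 'R' ∈ q) (h2 : 'D' ∉ q) : loopB q = "Radiant" := by
  rw [loopB]
  rw [dif_neg (by simp [h2]), if_pos h1]

-- the core bisimulation: A's two-queue loop equals B's one-queue loop on the merge
lemma loopA_eq_loopB : ∀ (n : Nat) (rs ds : List Int) (t : Int), rs.length + ds.length ≤ n →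
    rs.Pairwise (· < ·) → ds.Pairwise (· < ·) →
    (∀ x ∈ rs, x < t) → (∀ x ∈ ds, x < t) →
    loopA rs ds t = loopB (mg rs ds) := by
  intro n
  induction n with
  | zero =>
    intro rs ds t hn _ _ _ _
    have h1 : rs = [] := by apply List.eq_nil_of_length_eq_zero; omega
    subst h1
    rw [loopA, mg_nil_left, loopB_noR _ (by simp)]
  | succ n ih =>
    intro rs ds t hn hpr hpd hr hd
    cases rs with
    | nil =>
      rw [loopA, mg_nil_left, loopB_noR _ (by simp)]
    | cons r rs' =>
      cases ds with
      | nil =>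
        rw [loopA, mg_nil_right, loopB_noD _ (by simp) (by simp)]
      | cons d ds' =>
        rw [loopA, mg_cons_cons]
        by_cases hrd : r < d
        · rw [if_pos hrd, if_pos hrd]
          rw [loopB_step 'R' _ (by simp) (by simp [D_mem_mg])]
          rw [if_pos rfl]
          rw [erase_D_mg rs' d ds' (List.pairwise_cons.mp hpd).1]
          rw [← mg_append_R n rs' ds' t (by simp at hn ⊢; omega)
              (fun x hx => hr x (by simp [hx])) (fun x hx => hd x (by simp [hx]))]
          apply ih (rs' ++ [t]) ds' (t + 1) (by simp at hn ⊢; omega)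
          · rw [List.pairwise_append]
            exact ⟨(List.pairwise_cons.mp hpr).2, by simp,
              fun x hx y hy => by simp at hy; subst hy; exact hr x (by simp [hx])⟩
          · exact (List.pairwise_cons.mp hpd).2
          · intro x hx
            rcases List.mem_append.mp hx with h | h
            · have := hr x (by simp [h]); omega
            · simp at h; omega
          · intro x hx
            have := hd x (by simp [hx]); omega
        · rw [if_neg hrd, if_neg hrd]
          rw [loopB_step 'D' _ (by simp [R_mem_mg]) (by simp)]
          rw [if_neg (by decide)]
          rw [erase_R_mg ds' r rs' (List.pairwise_cons.mp hpr).1]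
          rw [← mg_append_D n rs' ds' t (by simp at hn ⊢; omega)
              (fun x hx => hr x (by simp [hx])) (fun x hx => hd x (by simp [hx]))]
          apply ih rs' (ds' ++ [t]) (t + 1) (by simp at hn ⊢; omega)
          · exact (List.pairwise_cons.mp hpr).2
          · rw [List.pairwise_append]
            exact ⟨(List.pairwise_cons.mp hpd).2, by simp,
              fun x hx y hy => by simp at hy; subst hy; exact hd x (by simp [hx])⟩
          · intro x hx
            have := hr x (by simp [hx]); omega
          · intro x hx
            rcases List.mem_append.mp hx with h | h
            · have := hd x (by simp [h]); omega
            · simp at h; omega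

lemma len_ridx_didx : ∀ (cs : List Char) (s : Int),
    (ridx cs s).length + (didx cs s).length = cs.length := by
  intro cs
  induction cs with
  | nil => intro s; simp [ridx, didx]
  | cons c cs ih =>
    intro s
    by_cases hc : c = 'R' <;> simp [ridx, didx, hc] <;> have := ih (s + 1) <;> omega

-- the merge of the initial index queues is B's normalised character queue
lemma mg_ridx_didx : ∀ (cs : List Char) (s : Int),
    mg (ridx cs s) (didx cs s) = cs.map (fun c => if c = 'R' then 'R' else 'D') := by
  intro cs
  induction cs with
  | nil => intro s; simp [ridx, didx, mg_nil_left]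
  | cons c cs ih =>
    intro s
    have hI := ih (s + 1)
    by_cases hc : c = 'R' <;> simp only [ridx, didx, hc, List.map_cons, reduceIte]
    · cases hdd : didx cs (s + 1) with
      | nil =>
        rw [hdd] at hI
        rw [mg_nil_right, List.map_cons, ← hI, mg_nil_right]
      | cons d ds' =>
        rw [hdd] at hI
        rw [mg_cons_cons,
          if_pos (by have := lb_didx cs (s + 1) d (by rw [hdd]; simp); omega), hI]
    · cases hrr : ridx cs (s + 1) with
      | nil =>
        rw [hrr] at hI
        rw [mg_nil_left, List.map_cons, ← hI, mg_nil_left]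
      | cons r rs' =>
        rw [hrr] at hI
        rw [mg_cons_cons,
          if_neg (by have := lb_ridx cs (s + 1) r (by rw [hrr]; simp); omega), hI]

-- ===== VERDICT (by name: the statement is the Claim_ definition above) =====
theorem predictPartyVictory_spec : Claim_equal_predictPartyVictory := by
  intro senate _
  unfold Spec_predictPartyVictory predictPartyVictory predictPartyVictory_alt
  rw [fold_init]
  simp only [List.nil_append]
  rw [loopA_eq_loopB (senate.toList.length + 1) _ _ _
      (by have := len_ridx_didx senate.toList 0; omega)
      (pairwise_ridx _ _) (pairwise_didx _ _)
      (fun x hx => by have := ub_ridx senate.toList 0 x hx; simp [PySem.Str.len_eq] at this ⊢; omega)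
      (fun x hx => by have := ub_didx senate.toList 0 x hx; simp [PySem.Str.len_eq] at this ⊢; omega)]
  rw [mg_ridx_didx]
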